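-- pv_equiv track=rewrite | github.com/Chandu7702984063/Open-Book-Test--Intech-Additive-Solutions | compression/advanced_compressor.py | advanced_compress
-- ===== SOURCE A (Python) =====
-- def advanced_compress(s):
--     result = []
--     i = 0
--     while i < len(s):
--         char = s[i]
--         i += 1
--         count = ''
--         while i < len(s) and s[i].isdigit():
--             count += s[i]
--             i += 1
--         if result and result[-1][0] == char:
--             continue
--         result.append(char + count)
--     return ''.join(result)
-- ===== SOURCE B (Python) =====
-- def advanced_compress(s):
--     # Pass 1: tokenize into char+digits units (digits attach to the previous token).
--     tokens = []
--     for c in s: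
--         if tokens and c.isdigit():
--             tokens[-1] += c
--         else:
--             tokens.append(c)
--     # Pass 2: keep a token only when its leading char differs from the last kept one.
--     result = []
--     for t in tokens:
--         if not result or result[-1][0] != t[0]:
--             result.append(t)
--     return ''.join(result)
-- ===== Notes on version B (the rewrite author's own statement) =====
-- stated objective: alternative
-- what changed: A's single fused index-driven while-loop (parse char+digit run and dedup in one step) is split into two independent left folds: a tokenize pass that attaches digits to the previous token, then a reduce pass keeping a token only when its leading char differs from the last kept one.
import Mathlib
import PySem

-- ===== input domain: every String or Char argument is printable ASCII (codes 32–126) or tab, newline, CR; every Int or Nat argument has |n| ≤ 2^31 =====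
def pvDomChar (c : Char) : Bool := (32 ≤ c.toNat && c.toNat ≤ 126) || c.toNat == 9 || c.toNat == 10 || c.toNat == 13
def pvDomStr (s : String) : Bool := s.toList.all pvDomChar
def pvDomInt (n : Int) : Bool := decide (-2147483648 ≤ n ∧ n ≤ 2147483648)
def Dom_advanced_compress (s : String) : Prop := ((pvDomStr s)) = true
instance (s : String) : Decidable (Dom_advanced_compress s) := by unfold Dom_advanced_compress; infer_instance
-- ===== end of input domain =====

-- B replaces A's fused parse/dedup while-loop by two independent folds (tokenize, then reduce); alternative decomposition, same cost.
-- Char.isDigit is exact for Python's str.isdigit on the ASCII domain Dom_advanced_compress.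

-- ===== PORT A =====
-- inner while loop of A: collect the run of digits, return (count, rest of input)
def acInner : List Char → List Char × List Char
  | [] => ([], [])
  | c :: cs => if c.isDigit then (c :: (acInner cs).1, (acInner cs).2) else ([], c :: cs)

theorem acInner_len : ∀ cs : List Char, (acInner cs).2.length ≤ cs.length := by
  intro cs
  induction cs with
  | nil => simp [acInner]
  | cons c cs ih =>
    by_cases h : c.isDigit <;> simp [acInner, h] <;> omega

-- outer while loop of A, state = (remaining input, result)
def acLoop (cs : List Char) (result : List (List Char)) : List (List Char) :=
  match cs with
  | [] => result
  | c :: rest =>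
    let p := acInner rest
    let skip : Bool := match result.getLast? with
      | some t => t.head? == some c
      | none => false
    if skip then acLoop p.2 result
    else acLoop p.2 (result ++ [c :: p.1])
termination_by cs.length
decreasing_by
  · exact Nat.lt_succ_of_le (acInner_len rest)
  · exact Nat.lt_succ_of_le (acInner_len rest)

def advanced_compress (s : String) : String :=
  String.mk (acLoop s.toList []).flatten

-- ===== PORT B =====
-- pass 1 step: append digit to last token, else start a new token
def tokStep (tokens : List (List Char)) (c : Char) : List (List Char) :=
  if !tokens.isEmpty && c.isDigit then tokens.dropLast ++ [tokens.getLastD [] ++ [c]]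
  else tokens ++ [[c]]

-- pass 2 step: keep the token only if result is empty or the last kept token's first char differs
def dedupStep (result : List (List Char)) (t : List Char) : List (List Char) :=
  if result.isEmpty || !((result.getLastD []).head? == t.head?) then result ++ [t]
  else result

def advanced_compress_alt (s : String) : String :=
  let tokens := s.toList.foldl tokStep []
  let result := tokens.foldl dedupStep []
  String.mk result.flatten

-- ===== PRECONDITION & SPEC =====
def Spec_advanced_compress (s : String) (out : String) : Prop := out = advanced_compress_alt s
instance (s : String) (out : String) : Decidable (Spec_advanced_compress s out) := by unfold Spec_advanced_compress; infer_instance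

-- ===== CLAIM (what is proved, stated in full; the proofs are below) =====
def Claim_equal_advanced_compress : Prop := ∀ (s : String), Dom_advanced_compress s → Spec_advanced_compress s (advanced_compress s)

-- ===== LEMMAS AND PROOFS =====

-- the token list A's fused loop implicitly walks over
def acTokens (cs : List Char) : List (List Char) :=
  match cs with
  | [] => []
  | c :: rest => (c :: (acInner rest).1) :: acTokens (acInner rest).2
termination_by cs.length
decreasing_by exact Nat.lt_succ_of_le (acInner_len rest)

theorem tok_concat (cs : List Char) : ∀ (acc : List (List Char)) (t : List Char),
    cs.foldl tokStep (acc ++ [t]) = acc ++ [t ++ (acInner cs).1] ++ acTokens (acInner cs).2 := by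
  induction cs with
  | nil => intro acc t; simp [acInner, acTokens]
  | cons c cs ih =>
    intro acc t
    by_cases h : c.isDigit
    · have : tokStep (acc ++ [t]) c = acc ++ [t ++ [c]] := by
        simp [tokStep, h]
      simp only [List.foldl_cons, this]
      rw [ih acc (t ++ [c])]
      simp [acInner, h]
    · have : tokStep (acc ++ [t]) c = (acc ++ [t]) ++ [[c]] := by
        simp [tokStep, h]
      simp only [List.foldl_cons, this]
      rw [ih (acc ++ [t]) [c]]
      simp [acInner, h, acTokens]

theorem tok_init (cs : List Char) : cs.foldl tokStep [] = acTokens cs := by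
  cases cs with
  | nil => simp [acTokens]
  | cons c cs =>
    have h0 : tokStep [] c = [] ++ [[c]] := by simp [tokStep]
    simp only [List.foldl_cons, h0]
    rw [tok_concat cs [] [c]]
    simp [acTokens]

theorem dedupStep_eq (result : List (List Char)) (c : Char) (d : List Char) :
    dedupStep result (c :: d) =
      (if (match result.getLast? with
            | some t => t.head? == some c
            | none => false) then result else result ++ [c :: d]) := by
  obtain rfl | ⟨ys, y, rfl⟩ := result.eq_nil_or_concat
  · simp [dedupStep]
  · by_cases h : y.head? == some c <;>
      simp [dedupStep, h]

theorem loop_eq : ∀ (n : ℕ) (cs : List Char) (result : List (List Char)), cs.length ≤ n →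
    acLoop cs result = (acTokens cs).foldl dedupStep result := by
  intro n
  induction n with
  | zero =>
    intro cs result h
    have : cs = [] := by cases cs <;> simp_all
    subst this; simp [acLoop, acTokens]
  | succ n ih =>
    intro cs result h
    cases cs with
    | nil => simp [acLoop, acTokens]
    | cons c rest =>
      rw [acLoop, acTokens]
      simp only [List.foldl_cons]
      rw [dedupStep_eq]
      have hlen : (acInner rest).2.length ≤ n := by
        have := acInner_len rest; simp at h; omega
      by_cases hs : (match result.getLast? with
            | some t => t.head? == some c
            | none => false) = true
      · simp only [hs]
        simpa [hs] using ih (acInner rest).2 result hlen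
      · simp only [hs]
        simpa [hs] using ih (acInner rest).2 (result ++ [c :: (acInner rest).1]) hlen

-- ===== VERDICT (by name: the statement is the Claim_ definition above) =====
theorem advanced_compress_spec : Claim_equal_advanced_compress := by
  intro s _
  show advanced_compress s = advanced_compress_alt s
  unfold advanced_compress advanced_compress_alt
  rw [tok_init, loop_eq s.toList.length s.toList [] le_rfl]
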